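-- pv_equiv track=rewrite | github.com/pandi07-star/crylab | ex4/Cmac.py | pad_block
-- ===== SOURCE A (Python) =====
-- def pad_block(block):
--     while len(block) < 16:
--         if len(block) == 0:
--             block.append(128)
--         else:
--             if 128 not in block:
--                 block.append(128)
--             else:
--                 block.append(0)
--     return block
-- ===== SOURCE B (Python) =====
-- def pad_block(block):
--     if len(block) >= 16:
--         return block
--     pad = 16 - len(block)
--     if 128 in block:
--         padding = [0] * pad
--     else:
--         padding = [128] + [0] * (pad - 1)
--     block.extend(padding)
--     return block
-- ===== Notes on version B (the rewrite author's own statement) =====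
-- stated objective: simpler
-- what changed: Replaces the per-byte while-loop that re-scans the block for 128 on every iteration with a single membership test and one extend of a precomputed padding list.
import Mathlib
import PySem

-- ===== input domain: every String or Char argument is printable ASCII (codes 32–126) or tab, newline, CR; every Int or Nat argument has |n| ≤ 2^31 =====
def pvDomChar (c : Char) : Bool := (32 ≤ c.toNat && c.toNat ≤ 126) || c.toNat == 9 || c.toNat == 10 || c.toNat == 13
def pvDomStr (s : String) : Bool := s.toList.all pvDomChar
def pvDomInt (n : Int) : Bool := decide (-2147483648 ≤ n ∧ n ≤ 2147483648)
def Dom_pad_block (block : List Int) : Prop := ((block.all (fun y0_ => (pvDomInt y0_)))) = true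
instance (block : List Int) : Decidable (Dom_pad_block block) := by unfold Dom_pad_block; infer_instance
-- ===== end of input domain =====

-- B replaces A's per-byte while-loop (which re-scans the block for 128 each iteration)
-- by one membership test and a single extend of a precomputed padding list (simpler).
-- Both A and B mutate the list argument in place in Python; the theorem is about the return value.

-- ===== PORT A =====
-- the while-loop: one append per iteration, terminating when length reaches 16
def pad_block (block : List Int) : List Int :=
  if _h : block.length < 16 then
    if block.length = 0 then
      pad_block (block ++ [128])
    else if ¬ block.contains 128 then
      pad_block (block ++ [128])
    else
      pad_block (block ++ [0])
  else
    block
termination_by 16 - block.length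
decreasing_by all_goals (simp; omega)

-- ===== PORT B =====
def pad_block_alt (block : List Int) : List Int :=
  if block.length ≥ 16 then
    block
  else
    let pad := 16 - block.length
    let padding := if block.contains 128 then List.replicate pad 0
                   else 128 :: List.replicate (pad - 1) 0
    block ++ padding

-- ===== PRECONDITION & SPEC =====
def Spec_pad_block (block : List Int) (out : List Int) : Prop := out = pad_block_alt block
instance (block : List Int) (out : List Int) : Decidable (Spec_pad_block block out) := by unfold Spec_pad_block; infer_instance

-- ===== CLAIM (what is proved, stated in full; the proofs are below) =====
def Claim_equal_pad_block : Prop := ∀ (block : List Int), Dom_pad_block block → Spec_pad_block block (pad_block block)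

-- ===== LEMMAS AND PROOFS =====

-- once 128 is in the block, A only appends zeros
theorem pad_block_of_contains (block : List Int) (h : 128 ∈ block) :
    pad_block block = block ++ List.replicate (16 - block.length) 0 := by
  by_cases hl : block.length < 16
  · have hne : block.length ≠ 0 := by
      intro h0
      rw [List.length_eq_zero_iff] at h0
      subst h0; simp at h
    rw [pad_block]
    simp only [hl, dif_pos, hne, if_neg, List.contains_iff_mem, h, not_true, not_false_iff]
    rw [pad_block_of_contains (block ++ [0]) (by simp [h])]
    have e : 16 - block.length = (16 - (block.length + 1)) + 1 := by omega
    simp [List.append_assoc, e, List.replicate_succ]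
  · rw [pad_block]
    simp only [hl, dif_neg, not_false_iff]
    have : 16 - block.length = 0 := by omega
    simp [this]
termination_by 16 - block.length
decreasing_by simp; omega

-- ===== VERDICT (by name: the statement is the Claim_ definition above) =====
theorem pad_block_spec : Claim_equal_pad_block := by
  intro block _
  unfold Spec_pad_block pad_block_alt
  by_cases hl : block.length < 16
  · have hge : ¬ block.length ≥ 16 := by omega
    rw [if_neg hge]
    by_cases hc : 128 ∈ block
    · -- already contains 128: A appends only zeros
      rw [pad_block_of_contains block hc]
      simp [hc]
    · -- A appends one 128 then zeros
      rw [pad_block]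
      by_cases h0 : block.length = 0
      · rw [List.length_eq_zero_iff] at h0; subst h0
        simp only [List.length_nil, if_pos, Nat.zero_lt_succ, dif_pos, List.nil_append]
        rw [pad_block_of_contains [128] (by decide)]
        simp [List.replicate_succ]
      · have hc' : ¬ (block.contains 128 = true) := by simpa [List.contains_iff_mem] using hc
        simp only [hl, dif_pos, h0, if_neg, hc', not_false_iff]
        rw [pad_block_of_contains (block ++ [128]) (by simp)]
        simp [List.append_assoc, List.length_append]
        omega
  · rw [pad_block]
    rw [dif_neg hl]
    rw [if_pos (by omega)]
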